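-- pv_equiv track=rewrite | github.com/pgallino/ALGO-1 | parcialito_4/RE_letras-ae.py | _tiene_mas_letra_a
-- ===== SOURCE A (Python) =====
-- def _tiene_mas_letra_a(cadena, le, la):
--
--     if cadena == "":
--         if la > le:
--             return True
--         else:
--             return False
--
--     letra = cadena[0]
--     if letra == "a":
--         la += 1
--
--     if letra == "e":
--         le += 1
--
--     return _tiene_mas_letra_a(cadena[1:], le, la)
-- ===== SOURCE B (Python) =====
-- def _tiene_mas_letra_a(cadena, le, la):
--     for letra in cadena:
--         if letra == "a":
--             la += 1
--         elif letra == "e":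
--             le += 1
--     return la > le
-- ===== Notes on version B (the rewrite author's own statement) =====
-- stated objective: simpler
-- what changed: Replaces A's recursion (with repeated O(n) string slicing cadena[1:] and a base-case if/else returning True/False) by a single flat for-loop over the characters with two counters and one final comparison.
import Mathlib
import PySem

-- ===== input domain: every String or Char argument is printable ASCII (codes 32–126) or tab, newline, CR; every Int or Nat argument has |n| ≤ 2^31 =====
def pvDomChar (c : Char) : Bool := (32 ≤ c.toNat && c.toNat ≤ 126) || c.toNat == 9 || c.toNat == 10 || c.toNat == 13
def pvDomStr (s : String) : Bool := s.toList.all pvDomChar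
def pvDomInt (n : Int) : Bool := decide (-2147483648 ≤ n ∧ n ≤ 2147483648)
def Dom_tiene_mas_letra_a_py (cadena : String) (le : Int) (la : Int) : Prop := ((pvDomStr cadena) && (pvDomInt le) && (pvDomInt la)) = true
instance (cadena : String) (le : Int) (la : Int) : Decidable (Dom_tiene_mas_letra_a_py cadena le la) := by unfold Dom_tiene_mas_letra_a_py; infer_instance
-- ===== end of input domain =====

-- B replaces A's recursion over cadena[1:] by one flat loop with two counters: simpler, same return value.
-- ===== PORT A =====
-- literal port of A's recursion: base case on "", peel cadena[0], recurse on cadena[1:]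
def tieneA : List Char → Int → Int → Bool
  | [], le, la => if la > le then true else false
  | letra :: rest, le, la =>
      let la' := if letra == 'a' then la + 1 else la
      let le' := if letra == 'e' then le + 1 else le
      tieneA rest le' la'

def tiene_mas_letra_a_py (cadena : String) (le : Int) (la : Int) : Bool :=
  tieneA cadena.toList le la

-- ===== PORT B =====
-- literal port of B: 'for letra in cadena' updating (le, la), then 'return la > le'
def tiene_mas_letra_a_py_alt (cadena : String) (le : Int) (la : Int) : Bool :=
  let p := cadena.toList.foldl
    (fun (acc : Int × Int) letra =>
      if letra == 'a' then (acc.1, acc.2 + 1)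
      else if letra == 'e' then (acc.1 + 1, acc.2)
      else acc) (le, la)
  decide (p.2 > p.1)

-- ===== PRECONDITION & SPEC =====
def Spec_tiene_mas_letra_a_py (cadena : String) (le : Int) (la : Int) (out : Bool) : Prop := out = tiene_mas_letra_a_py_alt cadena le la
instance (cadena : String) (le : Int) (la : Int) (out : Bool) : Decidable (Spec_tiene_mas_letra_a_py cadena le la out) := by unfold Spec_tiene_mas_letra_a_py; infer_instance

-- ===== CLAIM (what is proved, stated in full; the proofs are below) =====
def Claim_equal_tiene_mas_letra_a_py : Prop := ∀ (cadena : String) (le : Int) (la : Int), Dom_tiene_mas_letra_a_py cadena le la → Spec_tiene_mas_letra_a_py cadena le la (tiene_mas_letra_a_py cadena le la)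

-- ===== LEMMAS AND PROOFS =====
-- A's recursion with accumulators (le, la) computes exactly B's fold followed by the comparison.
theorem tieneA_eq_foldl (l : List Char) (le la : Int) :
    tieneA l le la =
      decide ((l.foldl (fun (acc : Int × Int) letra =>
        if letra == 'a' then (acc.1, acc.2 + 1)
        else if letra == 'e' then (acc.1 + 1, acc.2)
        else acc) (le, la)).2 > (l.foldl (fun (acc : Int × Int) letra =>
        if letra == 'a' then (acc.1, acc.2 + 1)
        else if letra == 'e' then (acc.1 + 1, acc.2)
        else acc) (le, la)).1) := by
  induction l generalizing le la with
  | nil => by_cases h : la > le <;> simp [tieneA, h]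
  | cons c rest ih =>
      simp only [tieneA, List.foldl_cons]
      by_cases ha : c = 'a' <;> by_cases he : c = 'e' <;> simp_all

-- ===== VERDICT (by name: the statement is the Claim_ definition above) =====
theorem tiene_mas_letra_a_py_spec : Claim_equal_tiene_mas_letra_a_py := by
  intro cadena le la _
  unfold Spec_tiene_mas_letra_a_py tiene_mas_letra_a_py tiene_mas_letra_a_py_alt
  exact tieneA_eq_foldl cadena.toList le la
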